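-- pv_equiv track=rewrite | github.com/PeffJepin/gamelib | gamelib/rendering/shaders.py | _check_default_arguments_syntax
-- ===== SOURCE A (Python) =====
-- def _check_default_arguments_syntax(defaults):
--     can_be_positional = True
--
--     for val in defaults:
--         if val is not None:
--             can_be_positional = False
--         elif can_be_positional is False:
--             return False
--
--     return True
-- ===== SOURCE B (Python) =====
-- def _check_default_arguments_syntax(defaults):
--     nones = [v is None for v in defaults]
--     return nones == sorted(nones, reverse=True)
-- ===== Notes on version B (the rewrite author's own statement) =====
-- stated objective: idiomatic
-- what changed: Replaces the stateful short-circuiting flag scan with a monotonicity test: build the None-indicator list once and compare it with its reverse-sorted copy (Nones-first means the indicator list is already reverse-sorted).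
import Mathlib
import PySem

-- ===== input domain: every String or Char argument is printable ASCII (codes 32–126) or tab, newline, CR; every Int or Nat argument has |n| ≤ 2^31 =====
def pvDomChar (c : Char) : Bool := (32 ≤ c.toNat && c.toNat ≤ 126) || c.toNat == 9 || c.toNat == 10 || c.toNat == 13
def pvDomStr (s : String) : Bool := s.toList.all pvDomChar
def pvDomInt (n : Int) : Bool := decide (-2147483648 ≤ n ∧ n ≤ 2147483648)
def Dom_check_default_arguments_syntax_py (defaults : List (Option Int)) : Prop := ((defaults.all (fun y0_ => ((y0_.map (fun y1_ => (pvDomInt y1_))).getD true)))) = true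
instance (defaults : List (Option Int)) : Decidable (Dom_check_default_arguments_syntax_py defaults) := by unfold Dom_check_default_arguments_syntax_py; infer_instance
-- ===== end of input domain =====

-- B replaces A's stateful short-circuiting flag scan by a monotonicity test
-- (the None-indicator list equals its reverse-sorted copy); same result, not faster.

-- ===== PORT A =====
-- the for-loop with its `can_be_positional` flag and early `return False`
def checkDefaultsLoop (can_be_positional : Bool) : List (Option Int) → Bool
  | [] => true
  | val :: rest =>
    if val ≠ none then checkDefaultsLoop false rest
    else if can_be_positional = false then false
    else checkDefaultsLoop can_be_positional rest

def check_default_arguments_syntax_py (defaults : List (Option Int)) : Bool :=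
  checkDefaultsLoop true defaults

-- ===== PORT B =====
def check_default_arguments_syntax_py_alt (defaults : List (Option Int)) : Bool :=
  let nones := defaults.map (fun v => v == none)
  nones == PySem.List.sorted nones (fun b => b) true

-- ===== PRECONDITION & SPEC =====
def Spec_check_default_arguments_syntax_py (defaults : List (Option Int)) (out : Bool) : Prop := out = check_default_arguments_syntax_py_alt defaults
instance (defaults : List (Option Int)) (out : Bool) : Decidable (Spec_check_default_arguments_syntax_py defaults out) := by unfold Spec_check_default_arguments_syntax_py; infer_instance

-- ===== CLAIM (what is proved, stated in full; the proofs are below) =====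
def Claim_equal_check_default_arguments_syntax_py : Prop := ∀ (defaults : List (Option Int)), Dom_check_default_arguments_syntax_py defaults → Spec_check_default_arguments_syntax_py defaults (check_default_arguments_syntax_py defaults)

-- ===== LEMMAS AND PROOFS =====

-- B returns true exactly when the indicator list is non-increasing (Nones first)
theorem alt_eq_pairwise (defaults : List (Option Int)) :
    check_default_arguments_syntax_py_alt defaults =
      decide ((defaults.map (fun v => v == none)).Pairwise (fun a b => b ≤ a)) := by
  unfold check_default_arguments_syntax_py_alt
  set nones := defaults.map (fun v => v == none) with hn
  by_cases h : nones.Pairwise (fun a b => b ≤ a)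
  · simp only [h, decide_true]
    have := PySem.List.sorted_rev_eq_self_of_pairwise (xs := nones) (key := fun b => b) h
    simp [this]
  · simp only [h, decide_false]
    rw [beq_eq_false_iff_ne]
    intro heq
    apply h
    have hp := PySem.List.sorted_pairwise_rev (xs := nones) (key := fun b => b)
    rw [← heq] at hp
    exact hp

-- with the flag already lowered, the loop succeeds iff no None remains
theorem loop_false_eq (defaults : List (Option Int)) :
    checkDefaultsLoop false defaults = defaults.all (fun v => v ≠ none) := by
  induction defaults with
  | nil => rfl
  | cons v rest ih =>
    cases v <;> simp [checkDefaultsLoop, ih]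

theorem pairwise_all_false (l : List Bool) (h : ∀ b ∈ l, b = false) :
    l.Pairwise (fun a b => b ≤ a) := by
  induction l with
  | nil => exact List.Pairwise.nil
  | cons x xs ih =>
    refine List.Pairwise.cons (fun b hb => ?_) (ih fun b hb => h b (List.mem_cons_of_mem _ hb))
    rw [h b (List.mem_cons_of_mem _ hb)]; exact Bool.false_le _

theorem loop_true_eq (defaults : List (Option Int)) :
    checkDefaultsLoop true defaults =
      decide ((defaults.map (fun v => v == none)).Pairwise (fun a b => b ≤ a)) := by
  induction defaults with
  | nil => rfl
  | cons v rest ih =>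
    cases v with
    | none =>
      simpa [checkDefaultsLoop, Bool.le_true] using ih
    | some x =>
      simp only [checkDefaultsLoop, reduceCtorEq, ne_eq, not_false_eq_true, if_true,
        List.map_cons]
      rw [loop_false_eq, Bool.eq_iff_iff]
      simp only [List.all_eq_true, decide_eq_true_eq, List.pairwise_cons, List.mem_map,
        forall_exists_index, and_imp, forall_apply_eq_imp_iff₂]
      constructor
      · intro hall
        have hfalse : ∀ w ∈ rest, ((w : Option Int) == none) = false := by
          intro w hw
          have h := hall w hw
          rw [beq_eq_false_iff_ne]
          exact h
        constructor
        · intro w hw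
          rw [hfalse w hw]; exact Bool.false_le _
        · exact pairwise_all_false _ (by
            intro b hb
            rcases List.mem_map.mp hb with ⟨w, hw, rfl⟩
            exact hfalse w hw)
      · rintro ⟨h1, -⟩ w hw
        have := h1 w hw
        simp only [show ((some x : Option Int) == none) = false from rfl] at this
        have hf : (w == none) = false := by
          cases hb : (w == none)
          · rfl
          · simp_all
            exact absurd this (by decide)
        rw [beq_eq_false_iff_ne] at hf
        exact hf

-- ===== VERDICT (by name: the statement is the Claim_ definition above) =====
theorem check_default_arguments_syntax_py_spec : Claim_equal_check_default_arguments_syntax_py := by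
  intro defaults _
  unfold Spec_check_default_arguments_syntax_py check_default_arguments_syntax_py
  rw [loop_true_eq, alt_eq_pairwise]
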